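-- pv_equiv track=rewrite | github.com/Oliverpickert/p2-DesSoft | funcoes.py | calcula_pontos_quadra
-- ===== SOURCE A (Python) =====
-- from collections import Counter
--
-- def calcula_pontos_quadra(dados):
--     counts = Counter(dados)
--     if any(v >= 4 for v in counts.values()):
--         total = 0
--         for value in dados:
--             total += value
--         return total
--     return 0
-- ===== SOURCE B (Python) =====
-- def _has_quad(s):
--     # s is sorted, so equal values are adjacent: strip one run of equal
--     # leading values of the remaining suffix at a time and check its length
--     n = len(s)
--     i = 0
--     while i < n:
--         a = s[i]
--         run = 1
--         i += 1
--         while i < n and s[i] == a: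
--             run += 1
--             i += 1
--         if run >= 4:
--             return True
--     return False
--
--
-- def calcula_pontos_quadra(dados):
--     if _has_quad(sorted(dados)):
--         total = 0
--         for value in dados:
--             total += value
--         return total
--     return 0
-- ===== Notes on version B (the rewrite author's own statement) =====
-- stated objective: alternative
-- what changed: Replaces the Counter hash-count plus scan over all multiplicities by sort-then-run-scan: after sorting, equal values are adjacent, so a single pass over leading runs detects a value occurring >= 4 times.
import Mathlib
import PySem

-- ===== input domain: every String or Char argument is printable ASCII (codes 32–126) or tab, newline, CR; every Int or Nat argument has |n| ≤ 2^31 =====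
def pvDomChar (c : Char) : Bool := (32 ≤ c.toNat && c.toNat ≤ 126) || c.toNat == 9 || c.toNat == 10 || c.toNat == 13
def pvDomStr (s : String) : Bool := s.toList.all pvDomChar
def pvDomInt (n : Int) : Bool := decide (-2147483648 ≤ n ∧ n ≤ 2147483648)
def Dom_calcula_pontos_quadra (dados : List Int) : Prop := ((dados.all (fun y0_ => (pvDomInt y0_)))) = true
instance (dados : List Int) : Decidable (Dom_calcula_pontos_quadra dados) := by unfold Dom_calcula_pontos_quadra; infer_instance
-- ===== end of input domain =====

-- B replaces the Counter multiplicity table by sort-then-run-scan (alternative decomposition, same result).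

-- ===== PORT A =====
def calcula_pontos_quadra (dados : List Int) : Int :=
  let counts := PySem.Dict.counter dados
  if counts.values.any (fun v => decide (4 ≤ v)) then
    dados.foldl (fun total value => total + value) 0
  else
    0

-- ===== PORT B =====
-- the 'while rest and rest[0] == s[0]' loop of _has_quad: returns (run, rest)
def hasQuadAux (x : Int) (run : Nat) : List Int → Nat × List Int
  | [] => (run, [])
  | b :: t => if b == x then hasQuadAux x (run + 1) t else (run, b :: t)

theorem hasQuadAux_snd_length (x : Int) (run : Nat) (t : List Int) :
    (hasQuadAux x run t).2.length ≤ t.length := by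
  induction t generalizing run with
  | nil => simp [hasQuadAux]
  | cons b t ih =>
    simp only [hasQuadAux]
    split
    · exact le_trans (ih _) (Nat.le_succ _)
    · simp

-- _has_quad(s)
def hasQuad : List Int → Bool
  | [] => false
  | a :: t =>
    let p := hasQuadAux a 1 t
    if 4 ≤ p.1 then true else hasQuad p.2
termination_by s => s.length
decreasing_by
  exact Nat.lt_succ_of_le (hasQuadAux_snd_length a 1 t)

def calcula_pontos_quadra_alt (dados : List Int) : Int :=
  if hasQuad (PySem.List.sorted dados (fun x => x) false) then
    dados.foldl (fun total value => total + value) 0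
  else
    0

-- ===== PRECONDITION & SPEC =====
def Spec_calcula_pontos_quadra (dados : List Int) (out : Int) : Prop := out = calcula_pontos_quadra_alt dados
instance (dados : List Int) (out : Int) : Decidable (Spec_calcula_pontos_quadra dados out) := by unfold Spec_calcula_pontos_quadra; infer_instance

-- ===== CLAIM (what is proved, stated in full; the proofs are below) =====
def Claim_equal_calcula_pontos_quadra : Prop := ∀ (dados : List Int), Dom_calcula_pontos_quadra dados → Spec_calcula_pontos_quadra dados (calcula_pontos_quadra dados)

-- ===== LEMMAS AND PROOFS =====

-- A's condition: some multiplicity in Counter(dados) is ≥ 4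
theorem counterAny_iff (dados : List Int) :
    ((PySem.Dict.counter dados).values.any (fun v => decide (4 ≤ v)) = true)
      ↔ ∃ x, 4 ≤ (dados.count x : Int) := by
  rw [PySem.Dict.values_eq_map_keys _ (PySem.Dict.nodup_keys_counter dados) 0]
  simp only [PySem.Dict.keys_counter, PySem.Dict.getD_counter, List.any_map, List.any_eq_true,
    Function.comp, decide_eq_true_eq, PySem.Set.mem_ofList]
  constructor
  · rintro ⟨x, _, hx⟩; exact ⟨x, hx⟩
  · rintro ⟨x, hx⟩
    refine ⟨x, ?_, hx⟩
    have hc : 4 ≤ dados.count x := by exact_mod_cast hx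
    exact List.count_pos_iff.mp (by omega)

theorem hasQuadAux_eq (x : Int) (run : Nat) (t : List Int) :
    hasQuadAux x run t
      = (run + (t.takeWhile (fun b => b == x)).length, t.dropWhile (fun b => b == x)) := by
  induction t generalizing run with
  | nil => simp [hasQuadAux]
  | cons b t ih =>
    simp only [hasQuadAux, List.takeWhile, List.dropWhile]
    by_cases hb : (b == x) = true
    · simp [hb, ih]; omega
    · simp [hb]

-- on a nondecreasing tail whose elements all dominate a, the dropWhile part contains no a
theorem not_mem_dropWhile_sorted (a : Int) (t : List Int)
    (hge : ∀ y ∈ t, a ≤ y) (hp : t.Pairwise (· ≤ ·)) :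
    a ∉ t.dropWhile (fun b => b == a) := by
  induction t with
  | nil => simp
  | cons b r ih =>
    rw [List.pairwise_cons] at hp
    by_cases hb : (b == a) = true
    · simp only [List.dropWhile, hb]
      exact ih (fun y hy => hge y (List.mem_cons_of_mem _ hy)) hp.2
    · simp only [List.dropWhile, hb]
      intro hmem
      rcases List.mem_cons.mp hmem with h | h
      · exact hb (by simp [h])
      · have h1 : a ≤ b := hge b (List.mem_cons_self)
        have h2 : b ≤ a := hp.1 a h
        exact hb (by have : b = a := le_antisymm h2 h1; simp [this])

-- count of the head value in a sorted cons: 1 + length of the leading run of the tail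
theorem count_head_sorted (a : Int) (t : List Int)
    (hnm : a ∉ t.dropWhile (fun b => b == a)) :
    (a :: t).count a = 1 + (t.takeWhile (fun b => b == a)).length := by
  have hsplit : t = t.takeWhile (fun b => b == a) ++ t.dropWhile (fun b => b == a) :=
    (List.takeWhile_append_dropWhile).symm
  rw [List.count_cons_self]
  conv_lhs => rw [hsplit]
  rw [List.count_append]
  have h1 : (t.takeWhile (fun b => b == a)).count a = (t.takeWhile (fun b => b == a)).length := by
    rw [List.count_eq_length]
    intro b hb
    have hba := List.mem_takeWhile_imp hb
    simp only [beq_iff_eq] at hba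
    exact hba.symm
  have h2 : (t.dropWhile (fun b => b == a)).count a = 0 := List.count_eq_zero.mpr hnm
  omega

-- count of any other value is unchanged by stripping the head and its run
theorem count_ne_sorted (a x : Int) (t : List Int) (hne : x ≠ a) :
    (a :: t).count x = (t.dropWhile (fun b => b == a)).count x := by
  have hsplit : t = t.takeWhile (fun b => b == a) ++ t.dropWhile (fun b => b == a) :=
    (List.takeWhile_append_dropWhile).symm
  have hcc : (a :: t).count x = t.count x := by
    simp [Ne.symm hne]
  rw [hcc]
  conv_lhs => rw [hsplit]
  rw [List.count_append]
  have h1 : (t.takeWhile (fun b => b == a)).count x = 0 := by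
    rw [List.count_eq_zero]
    intro hx
    have hxa := List.mem_takeWhile_imp hx
    simp only [beq_iff_eq] at hxa
    exact hne hxa
  omega

-- B's condition on a sorted list: some value has count ≥ 4
theorem hasQuad_iff_aux : ∀ (n : Nat) (s : List Int), s.length ≤ n → s.Pairwise (· ≤ ·) →
    (hasQuad s = true ↔ ∃ x, 4 ≤ s.count x) := by
  intro n
  induction n with
  | zero =>
    intro s hs _
    have : s = [] := List.eq_nil_of_length_eq_zero (Nat.le_antisymm hs (Nat.zero_le _))
    subst this
    simp [hasQuad]
  | succ n ih =>
    intro s hs hp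
    match s with
    | [] => simp [hasQuad]
    | a :: t =>
      have hge : ∀ y ∈ t, a ≤ y := (List.pairwise_cons.mp hp).1
      have hpt : t.Pairwise (· ≤ ·) := (List.pairwise_cons.mp hp).2
      have hnm := not_mem_dropWhile_sorted a t hge hpt
      have hca := count_head_sorted a t hnm
      rw [hasQuad, hasQuadAux_eq]
      simp only []
      by_cases h4 : 4 ≤ 1 + (t.takeWhile (fun b => b == a)).length
      · rw [if_pos h4]
        constructor
        · intro _; exact ⟨a, by omega⟩
        · intro _; rfl
      · rw [if_neg h4]
        have hsub : (t.dropWhile (fun b => b == a)).Sublist t := List.dropWhile_sublist _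
        have hlen : (t.dropWhile (fun b => b == a)).length ≤ n := by
          have := hsub.length_le
          simp only [List.length_cons] at hs
          omega
        have hpd : (t.dropWhile (fun b => b == a)).Pairwise (· ≤ ·) := hpt.sublist hsub
        rw [ih _ hlen hpd]
        constructor
        · rintro ⟨x, hx⟩
          by_cases hxa : x = a
          · exfalso
            subst hxa
            have : (t.dropWhile (fun b => b == x)).count x = 0 := List.count_eq_zero.mpr hnm
            omega
          · refine ⟨x, ?_⟩
            rw [← count_ne_sorted a x t hxa] at hx
            exact hx
        · rintro ⟨x, hx⟩
          by_cases hxa : x = a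
          · subst hxa; exact ⟨x, by omega⟩
          · refine ⟨x, ?_⟩
            rw [count_ne_sorted a x t hxa] at hx
            exact hx

theorem hasQuad_iff (s : List Int) (h : s.Pairwise (· ≤ ·)) :
    hasQuad s = true ↔ ∃ x, 4 ≤ s.count x :=
  hasQuad_iff_aux s.length s (Nat.le_refl _) h

-- ===== VERDICT (by name: the statement is the Claim_ definition above) =====
theorem calcula_pontos_quadra_spec : Claim_equal_calcula_pontos_quadra := by
  intro dados _
  unfold Spec_calcula_pontos_quadra calcula_pontos_quadra calcula_pontos_quadra_alt
  have hA := counterAny_iff dados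
  have hB := hasQuad_iff (PySem.List.sorted dados (fun x => x) false)
    (PySem.List.sorted_pairwise dados (fun x => x))
  have hcnt : ∀ x : Int, (PySem.List.sorted dados (fun x => x) false).count x = dados.count x :=
    fun x => (PySem.List.sorted_perm dados (fun x => x) false).count_eq x
  simp only [hcnt] at hB
  by_cases hc : ∃ x, 4 ≤ (dados.count x : Int)
  · rw [if_pos (hA.mpr hc), if_pos (hB.mpr (by obtain ⟨x, hx⟩ := hc; exact ⟨x, by exact_mod_cast hx⟩))]
  · rw [if_neg (fun hh => hc (hA.mp hh)), if_neg (fun hh => hc (by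
      obtain ⟨x, hx⟩ := hB.mp hh; exact ⟨x, by exact_mod_cast hx⟩))]
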